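-- pv_equiv track=rewrite | github.com/Hyojeong721/TIL | make_sub_reop_file/SWA/0820/ready2start/5356_의석이의세로로말해요/s1.py | traverse_vertically
-- ===== SOURCE A (Python) =====
-- def get_max_length(words):
--     """
--     문자열 배열을 인자로 받아, 가장 긴 문자열의 길이를 구한다.
--
--     Args:
--         words: 문자열 배열
--     Returns:
--         max_length: 가장 긴 문자열의 길이
--     """
--     max_length = 0
--
--     for word in words:
--         if len(word) > max_length:
--             max_length = len(word)
--
--     return max_length
--
-- def traverse_vertically(words):
--     """
--     문자열 배열을 인자로 받아, 세로로 순회한다.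
--     ex. words = ['abc', '12', 'DEF']인 경우,
--         a => 1 => D => b => 2 => E => c => F의 순서로 순회한다.
--
--     Args:
--         words: 문자열 배열
--                (단, 문자열의 길이는 서로 다를 수 있다.)
--     Returns:
--         total: 문자열 배열 전체를 세로로 순회한 문자열 (위 예시의 경우, 'a1Db2EcF')
--     """
--     total = ""
--     max_length = get_max_length(words)
--
--     for c in range(max_length):
--         for word in words:
--             # 해당 문자열의 마지막 인덱스가 c 이상이라면
--             if len(word) > c:
--                 total += word[c]
--
--     return total
-- ===== SOURCE B (Python) =====
-- def traverse_vertically(words):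
--     # Head-peeling transpose: each round collects the first character of every
--     # remaining non-empty word, then drops those heads; one final join.
--     chars = []
--     rest = [w for w in words if w]
--     while rest:
--         for w in rest:
--             chars.append(w[0])
--         rest = [w[1:] for w in rest if len(w) > 1]
--     return "".join(chars)
-- ===== Notes on version B (the rewrite author's own statement) =====
-- stated objective: alternative
-- what changed: Replaces the max-length pre-pass plus per-column index-checked scan over all words with a head-peeling transpose: each round collects the first character of every remaining non-empty word and drops those heads, joining the collected characters once at the end.
import Mathlib
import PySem

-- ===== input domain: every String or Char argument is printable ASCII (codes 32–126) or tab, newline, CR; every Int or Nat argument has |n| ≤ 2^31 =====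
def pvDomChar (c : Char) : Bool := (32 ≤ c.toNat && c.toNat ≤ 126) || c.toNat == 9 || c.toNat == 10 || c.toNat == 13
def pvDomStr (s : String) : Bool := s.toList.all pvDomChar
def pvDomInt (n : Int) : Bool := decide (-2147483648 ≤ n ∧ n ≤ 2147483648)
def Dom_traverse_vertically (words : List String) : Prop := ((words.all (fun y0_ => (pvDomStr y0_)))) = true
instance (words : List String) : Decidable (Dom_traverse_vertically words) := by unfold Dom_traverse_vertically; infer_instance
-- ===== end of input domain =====

-- B replaces A's max-length pre-pass and index-checked column scan by a head-peeling
-- transpose with one final join (objective: alternative; return value only, no mutation).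

-- ===== PORT A =====
def get_max_length (words : List String) : Int :=
  words.foldl
    (fun max_length word =>
      if PySem.Str.len word > max_length then PySem.Str.len word else max_length) 0

def traverse_vertically (words : List String) : String :=
  (PySem.List.pyRange 0 (get_max_length words) 1).foldl
    (fun total c =>
      words.foldl
        (fun total word =>
          if PySem.Str.len word > c then
            -- word[c]: always in range under the guard; the none branch is unreachable
            (match PySem.Str.pyGet? word c with
             | some ch => total.push ch
             | none => total)
          else total) total) ""

-- ===== PORT B =====
-- rest = [w[1:] for w in rest if len(w) > 1]
def peelNext (rest : List (List Char)) : List (List Char) :=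
  (rest.filter (fun w => 1 < w.length)).map List.tail

-- termination measure for B's while loop
def peelMu (rest : List (List Char)) : Nat := rest.length + (rest.map List.length).sum

theorem peelMu_next_le : ∀ rest : List (List Char), peelMu (peelNext rest) ≤ peelMu rest
  | [] => Nat.le_refl _
  | w :: ls => by
    have ih := peelMu_next_le ls
    by_cases h : 1 < w.length
    · have h1 : peelNext (w :: ls) = w.tail :: peelNext ls := by
        simp [peelNext, h]
      rw [h1]
      simp only [peelMu, List.length_cons, List.map_cons, List.sum_cons, List.length_tail] at ih ⊢
      omega
    · have h1 : peelNext (w :: ls) = peelNext ls := by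
        simp [peelNext, h]
      rw [h1]
      simp only [peelMu, List.length_cons, List.map_cons, List.sum_cons] at ih ⊢
      omega

theorem peelMu_next_lt (rest : List (List Char)) (h : rest ≠ []) :
    peelMu (peelNext rest) < peelMu rest := by
  cases rest with
  | nil => exact absurd rfl h
  | cons w ls =>
    have hle := peelMu_next_le ls
    by_cases hw : 1 < w.length
    · have h1 : peelNext (w :: ls) = w.tail :: peelNext ls := by
        simp [peelNext, hw]
      rw [h1]
      simp only [peelMu, List.length_cons, List.map_cons, List.sum_cons, List.length_tail] at hle ⊢
      omega
    · have h1 : peelNext (w :: ls) = peelNext ls := by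
        simp [peelNext, hw]
      rw [h1]
      simp only [peelMu, List.length_cons, List.map_cons, List.sum_cons] at hle ⊢
      omega

-- while rest: chars += heads of rest; rest = tails of the words longer than 1
def peelRounds (rest : List (List Char)) (chars : List Char) : List Char :=
  if h : rest = [] then chars
  else peelRounds (peelNext rest) (chars ++ rest.map List.headI)
termination_by peelMu rest
decreasing_by exact peelMu_next_lt rest h

def traverse_vertically_alt (words : List String) : String :=
  String.ofList (peelRounds ((words.map String.toList).filter (fun w => w ≠ [])) [])

-- ===== PRECONDITION & SPEC =====
def Spec_traverse_vertically (words : List String) (out : String) : Prop := out = traverse_vertically_alt words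
instance (words : List String) (out : String) : Decidable (Spec_traverse_vertically words out) := by unfold Spec_traverse_vertically; infer_instance

-- ===== CLAIM (what is proved, stated in full; the proofs are below) =====
def Claim_equal_traverse_vertically : Prop := ∀ (words : List String), Dom_traverse_vertically words → Spec_traverse_vertically words (traverse_vertically words)

-- ===== LEMMAS AND PROOFS =====

-- canonical value: the characters of column c, and all columns concatenated
def vcol (lss : List (List Char)) (c : Nat) : List Char := lss.filterMap (fun l => l[c]?)

def maxLen (lss : List (List Char)) : Nat := lss.foldl (fun m l => max m l.length) 0

def vAll (lss : List (List Char)) : List Char := (List.range (maxLen lss)).flatMap (vcol lss)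

theorem maxLen_nil : maxLen [] = 0 := rfl

theorem maxLen_acc : ∀ (lss : List (List Char)) (n : Nat),
    lss.foldl (fun m l => max m l.length) n = max n (maxLen lss)
  | [], n => by rw [List.foldl_nil, maxLen_nil, Nat.max_zero]
  | l :: ls, n => by
    have h1 : maxLen (l :: ls) = ls.foldl (fun m l => max m l.length) (max 0 l.length) := rfl
    rw [List.foldl_cons, maxLen_acc ls (max n l.length), h1, maxLen_acc ls (max 0 l.length),
      Nat.zero_max, Nat.max_assoc]

theorem maxLen_cons (l : List Char) (ls : List (List Char)) :
    maxLen (l :: ls) = max l.length (maxLen ls) := by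
  have h1 : maxLen (l :: ls) = ls.foldl (fun m l => max m l.length) (max 0 l.length) := rfl
  rw [h1, maxLen_acc ls (max 0 l.length), Nat.zero_max]

theorem max_sub_one (a b : Nat) : max a b - 1 = max (a - 1) (b - 1) := by
  rcases Nat.le_total a b with h | h
  · rw [Nat.max_eq_right h, Nat.max_eq_right (by omega)]
  · rw [Nat.max_eq_left h, Nat.max_eq_left (by omega)]

-- A's helper computes maxLen
theorem gml_acc (ws : List String) : ∀ n : Nat,
    ws.foldl (fun m w => if PySem.Str.len w > m then PySem.Str.len w else m) (n : Int)
      = ((max n (maxLen (ws.map String.toList)) : Nat) : Int) := by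
  induction ws with
  | nil =>
    intro n
    rw [List.foldl_nil, List.map_nil, maxLen_nil, Nat.max_zero]
  | cons w ws ih =>
    intro n
    have hlen : PySem.Str.len w = (w.toList.length : Int) := by simp [pysem]
    have hstep : (if PySem.Str.len w > (n : Int) then PySem.Str.len w else (n : Int))
        = ((max n w.toList.length : Nat) : Int) := by
      rw [hlen]; split_ifs <;> push_cast <;> omega
    rw [List.foldl_cons, hstep, ih (max n w.toList.length), List.map_cons, maxLen_cons]
    congr 1
    exact Nat.max_assoc n _ _

theorem get_max_length_eq (words : List String) :
    get_max_length words = ((maxLen (words.map String.toList) : Nat) : Int) := by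
  have h := gml_acc words 0
  simpa [get_max_length] using h

-- A's inner loop collects column c
theorem innerA (ws : List String) (c : Nat) : ∀ total : String,
    (ws.foldl
      (fun total word =>
        if PySem.Str.len word > (c : Int) then
          (match PySem.Str.pyGet? word (c : Int) with
           | some ch => total.push ch
           | none => total)
        else total) total).toList
      = total.toList ++ vcol (ws.map String.toList) c := by
  induction ws with
  | nil => intro total; simp [vcol]
  | cons w ws ih =>
    intro total
    have hlen : PySem.Str.len w = (w.toList.length : Int) := by simp [pysem]
    have hget : PySem.Str.pyGet? w (c : Int) = w.toList[c]? := by simp [pysem]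
    by_cases h : c < w.toList.length
    · have hsome : w.toList[c]? = some w.toList[c] := List.getElem?_eq_getElem h
      simp only [List.foldl_cons, hlen, hget, hsome]
      rw [if_pos (by exact_mod_cast h)]
      rw [ih]
      simp [vcol, hsome]
    · have hnone : w.toList[c]? = none := List.getElem?_eq_none (by omega)
      simp only [List.foldl_cons, hlen, hget, hnone]
      rw [if_neg (by omega)]
      rw [ih]
      simp [vcol, hnone]

-- A's outer loop concatenates the columns
theorem outerA (ws : List String) : ∀ (cs : List Nat) (total : String),
    (cs.foldl
      (fun (total : String) (c : Nat) =>
        ws.foldl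
          (fun total word =>
            if PySem.Str.len word > (c : Int) then
              (match PySem.Str.pyGet? word (c : Int) with
               | some ch => total.push ch
               | none => total)
            else total) total) total).toList
      = total.toList ++ cs.flatMap (vcol (ws.map String.toList)) := by
  intro cs
  induction cs with
  | nil => intro total; simp
  | cons c cs ih =>
    intro total
    rw [List.foldl_cons, List.flatMap_cons, ih, innerA ws c total, List.append_assoc]

theorem A_toList (words : List String) :
    (traverse_vertically words).toList = vAll (words.map String.toList) := by
  unfold traverse_vertically
  rw [get_max_length_eq, PySem.List.pyRange_one]
  have h1 : ((((maxLen (words.map String.toList) : Nat) : Int)) - 0).toNat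
      = maxLen (words.map String.toList) := by omega
  rw [h1]
  simp only [List.foldl_map, zero_add]
  rw [outerA words (List.range (maxLen (words.map String.toList))) ""]
  simp [vAll]

-- B-side facts
theorem getElem?_succ_tail (l : List Char) (c : Nat) : l[c + 1]? = l.tail[c]? := by
  cases l <;> simp

theorem vcol_zero (rest : List (List Char)) (h : ∀ l ∈ rest, l ≠ []) :
    vcol rest 0 = rest.map List.headI := by
  induction rest with
  | nil => simp [vcol]
  | cons l ls ih =>
    have hl := h l (by simp)
    cases l with
    | nil => exact absurd rfl hl
    | cons a t =>
      simp only [vcol, List.filterMap_cons, List.getElem?_cons_zero, List.map_cons,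
        List.headI]
      rw [show (ls.filterMap fun l => l[0]?) = vcol ls 0 from rfl,
        ih (fun l hm => h l (by simp [hm]))]

theorem vcol_succ (rest : List (List Char)) (c : Nat) :
    vcol rest (c + 1) = vcol (peelNext rest) c := by
  induction rest with
  | nil => simp [vcol, peelNext]
  | cons l ls ih =>
    by_cases hl : 1 < l.length
    · have hstep : peelNext (l :: ls) = l.tail :: peelNext ls := by
        simp [peelNext, hl]
      rw [hstep]
      simp only [vcol, List.filterMap_cons]
      rw [getElem?_succ_tail l c,
        show List.filterMap (fun l => l[c + 1]?) ls
            = List.filterMap (fun l => l[c]?) (peelNext ls) from ih]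
    · have hstep : peelNext (l :: ls) = peelNext ls := by
        simp [peelNext, hl]
      have htail : l.tail = [] := by
        cases l with
        | nil => rfl
        | cons a t =>
          simp only [List.length_cons, not_lt] at hl
          have ht : t.length = 0 := by omega
          simpa using List.eq_nil_of_length_eq_zero ht
      have hnone : l[c + 1]? = none := by rw [getElem?_succ_tail, htail]; simp
      rw [hstep]
      simp only [vcol, List.filterMap_cons, hnone]
      exact ih

theorem peelNext_ne (rest : List (List Char)) :
    ∀ l ∈ peelNext rest, l ≠ [] := by
  intro l hl
  simp only [peelNext, List.mem_map, List.mem_filter] at hl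
  obtain ⟨w, ⟨_, hw⟩, rfl⟩ := hl
  have h1 : 1 < w.length := by simpa using hw
  cases w with
  | nil => simp at h1
  | cons a t =>
    simp only [List.length_cons] at h1
    have : t.length ≠ 0 := by omega
    simpa [List.tail] using fun he => this (by rw [he]; rfl)

theorem maxLen_peelNext : ∀ rest : List (List Char), (∀ l ∈ rest, l ≠ []) →
    maxLen (peelNext rest) = maxLen rest - 1
  | [], _ => rfl
  | l :: ls, h => by
    have hl := h l (by simp)
    have ihls := maxLen_peelNext ls (fun l hm => h l (by simp [hm]))
    have hlpos : 0 < l.length := List.length_pos_iff.mpr hl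
    have hlsbound : ls = [] ∨ 1 ≤ maxLen ls := by
      cases ls with
      | nil => exact Or.inl rfl
      | cons l' ls' =>
        refine Or.inr ?_
        have h0 : 0 < l'.length := List.length_pos_iff.mpr (h l' (by simp))
        rw [maxLen_cons]
        omega
    by_cases hk : 1 < l.length
    · have hstep : peelNext (l :: ls) = l.tail :: peelNext ls := by
        simp [peelNext, hk]
      rw [hstep, maxLen_cons, maxLen_cons, List.length_tail, ihls, max_sub_one]
    · have hstep : peelNext (l :: ls) = peelNext ls := by
        simp [peelNext, hk]
      rw [hstep, maxLen_cons, ihls]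
      rcases hlsbound with h0 | h1
      · subst h0
        rw [maxLen_nil, Nat.max_zero]
        omega
      · rw [Nat.max_eq_right (by omega)]

theorem maxLen_pos (rest : List (List Char)) (hne : rest ≠ []) (h : ∀ l ∈ rest, l ≠ []) :
    1 ≤ maxLen rest := by
  cases rest with
  | nil => exact absurd rfl hne
  | cons l ls =>
    have h0 : 0 < l.length := List.length_pos_iff.mpr (h l (by simp))
    rw [maxLen_cons]
    omega

theorem vAll_step (rest : List (List Char)) (hne : rest ≠ []) (h : ∀ l ∈ rest, l ≠ []) :
    vAll rest = rest.map List.headI ++ vAll (peelNext rest) := by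
  have hm1 := maxLen_pos rest hne h
  obtain ⟨m, hm⟩ : ∃ m, maxLen rest = m + 1 := ⟨maxLen rest - 1, by omega⟩
  have hmn : maxLen (peelNext rest) = m := by
    rw [maxLen_peelNext rest h, hm]
    omega

  rw [vAll, vAll, hm, hmn, List.range_succ_eq_map, List.flatMap_cons, vcol_zero rest h]
  congr 1
  rw [List.flatMap_map]
  congr 1
  funext c
  exact vcol_succ rest c

theorem peel_correct (n : Nat) : ∀ (rest : List (List Char)) (chars : List Char),
    peelMu rest ≤ n → (∀ l ∈ rest, l ≠ []) → peelRounds rest chars = chars ++ vAll rest := by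
  induction n with
  | zero =>
    intro rest chars hmu h
    cases rest with
    | nil => rw [peelRounds]; simp [vAll, maxLen_nil]
    | cons l ls => simp [peelMu] at hmu
  | succ n ih =>
    intro rest chars hmu h
    by_cases hne : rest = []
    · subst hne; rw [peelRounds]; simp [vAll, maxLen_nil]
    · rw [peelRounds, dif_neg hne]
      have hlt := peelMu_next_lt rest hne
      rw [ih (peelNext rest) _ (by omega) (peelNext_ne rest),
        vAll_step rest hne h, List.append_assoc]

theorem filter_ne_entries (lss : List (List Char)) :
    ∀ l ∈ lss.filter (fun w => w ≠ []), l ≠ [] := by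
  intro l hl
  have h := List.of_mem_filter hl
  simpa using h

theorem maxLen_filter : ∀ lss : List (List Char),
    maxLen (lss.filter (fun w => w ≠ [])) = maxLen lss
  | [] => rfl
  | l :: ls => by
    by_cases hl : l = []
    · subst hl
      rw [show List.filter (fun w => w ≠ []) ([] :: ls)
            = List.filter (fun w => w ≠ []) ls from by simp,
        maxLen_filter ls, maxLen_cons]
      simp
    · rw [show List.filter (fun w => w ≠ []) (l :: ls)
            = l :: List.filter (fun w => w ≠ []) ls from by simp [hl],
        maxLen_cons, maxLen_cons, maxLen_filter ls]

theorem vcol_filter : ∀ (lss : List (List Char)) (c : Nat),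
    vcol (lss.filter (fun w => w ≠ [])) c = vcol lss c
  | [], _ => rfl
  | l :: ls, c => by
    by_cases hl : l = []
    · subst hl
      rw [show List.filter (fun w => w ≠ []) ([] :: ls)
            = List.filter (fun w => w ≠ []) ls from by simp,
        vcol_filter ls c,
        show vcol ([] :: ls) c = vcol ls c from by simp [vcol]]
    · rw [show List.filter (fun w => w ≠ []) (l :: ls)
            = l :: List.filter (fun w => w ≠ []) ls from by simp [hl]]
      simp only [vcol, List.filterMap_cons]
      rw [show List.filterMap (fun l => l[c]?) (List.filter (fun w => w ≠ []) ls)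
            = List.filterMap (fun l => l[c]?) ls from vcol_filter ls c]

theorem vAll_filter (lss : List (List Char)) :
    vAll (lss.filter (fun w => w ≠ [])) = vAll lss := by
  rw [vAll, vAll, maxLen_filter]
  congr 1
  funext c
  exact vcol_filter lss c

theorem B_toList (words : List String) :
    (traverse_vertically_alt words).toList = vAll (words.map String.toList) := by
  unfold traverse_vertically_alt
  rw [peel_correct (peelMu ((words.map String.toList).filter (fun w => w ≠ [])))
      _ [] le_rfl (filter_ne_entries _)]
  rw [List.nil_append, ← vAll_filter (words.map String.toList)]
  simp

-- ===== VERDICT (by name: the statement is the Claim_ definition above) =====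
theorem traverse_vertically_spec : Claim_equal_traverse_vertically := by
  intro words _
  unfold Spec_traverse_vertically
  have h : (traverse_vertically words).toList = (traverse_vertically_alt words).toList := by
    rw [A_toList, B_toList]
  exact String.toList_injective h
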